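-- pv_equiv track=rewrite | github.com/Alt-AI-Inc/Personality-Analyzer- | generate_chat_characteristics.py | _extract_greeting_patterns
-- ===== SOURCE A (Python) =====
-- from typing import Dict, List, Tuple, Set
--
-- def _extract_greeting_patterns(greeting_messages: List[str]) -> List[str]:
--     """Extract common patterns from greeting messages"""
--     patterns = []
--
--     if not greeting_messages:
--         return patterns
--
--     # Analyze greeting styles
--     casual_greetings = sum(1 for msg in greeting_messages
--                           if any(word in msg.lower() for word in ['hey', 'hi']))
--     if casual_greetings > len(greeting_messages) * 0.7:
--         patterns.append("Prefers casual greetings (Hey, Hi)")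
--
--     # Analyze follow-up patterns
--     question_greetings = sum(1 for msg in greeting_messages if '?' in msg)
--     if question_greetings > len(greeting_messages) * 0.5:
--         patterns.append("Often includes questions in greetings")
--
--     # Analyze length patterns
--     brief_greetings = sum(1 for msg in greeting_messages if len(msg.split()) <= 5)
--     if brief_greetings > len(greeting_messages) * 0.6:
--         patterns.append("Keeps greetings brief and direct")
--
--     return patterns
-- ===== SOURCE B (Python) =====
-- def _extract_greeting_patterns(greeting_messages):
--     """Build a histogram of per-message feature signatures, then threshold its marginals."""
--     if not greeting_messages:
--         return []
--     hist = {}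
--     for msg in greeting_messages:
--         low = msg.lower()
--         sig = ('hey' in low or 'hi' in low, '?' in msg, len(msg.split()) <= 5)
--         hist[sig] = hist.get(sig, 0) + 1
--     n = len(greeting_messages)
--     casual = sum(v for sig, v in hist.items() if sig[0])
--     question = sum(v for sig, v in hist.items() if sig[1])
--     brief = sum(v for sig, v in hist.items() if sig[2])
--     return (["Prefers casual greetings (Hey, Hi)"] if casual > n * 0.7 else []) \
--          + (["Often includes questions in greetings"] if question > n * 0.5 else []) \
--          + (["Keeps greetings brief and direct"] if brief > n * 0.6 else [])
-- ===== Notes on version B (the rewrite author's own statement) =====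
-- stated objective: alternative
-- what changed: A counts each pattern with its own full scan of the message list; B classifies every message once into a boolean feature signature, aggregates those signatures into a dict histogram (at most 8 keys), and then reads each pattern count off as a marginal sum over the histogram before applying the same thresholds.
import Mathlib
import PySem

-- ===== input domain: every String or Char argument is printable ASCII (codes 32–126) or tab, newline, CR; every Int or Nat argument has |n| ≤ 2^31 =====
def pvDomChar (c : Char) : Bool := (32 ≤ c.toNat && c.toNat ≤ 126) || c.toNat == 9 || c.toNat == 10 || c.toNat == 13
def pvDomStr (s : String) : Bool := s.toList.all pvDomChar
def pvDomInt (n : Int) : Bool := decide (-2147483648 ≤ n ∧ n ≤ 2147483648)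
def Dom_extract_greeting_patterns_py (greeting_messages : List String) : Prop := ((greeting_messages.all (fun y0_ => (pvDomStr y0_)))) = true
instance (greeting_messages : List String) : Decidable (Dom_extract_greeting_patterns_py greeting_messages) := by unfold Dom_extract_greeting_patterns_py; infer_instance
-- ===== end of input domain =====

-- B replaces A's three per-pattern scans by one classification pass into a dict histogram of
-- boolean feature signatures whose marginals give the three counts; objective: alternative.

-- Shared semantic helpers (the meaning of Python's 'count > n * 0.7' comparison and of the
-- three message predicates; both ports use them, the algorithms around them differ).
-- Python evaluates 'count > n * c' with c a float literal: the product float(n)*c is rounded to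
-- 53 significant bits (round-to-nearest, ties-to-even) and compared exactly against the int.
-- rnd53 is that rounding of the exact integer product n * m, where m = c's IEEE-754 significand
-- scaled so that c = m / 2^53; exact for lists shorter than 2^53 elements.
def rnd53 (P : Nat) : Nat :=
  if P < 2 ^ 53 then P
  else
    let k := Nat.log2 P + 1 - 53
    let q := P / 2 ^ k
    let r := P % 2 ^ k
    let h := 2 ^ (k - 1)
    (q + (if h < r ∨ (r = h ∧ q % 2 = 1) then 1 else 0)) * 2 ^ k

-- count > n * c  (c given by its scaled significand m: 0.7 ↦ 6305039478318694, 0.5 ↦ 2^52, 0.6 ↦ 5404319552844595)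
def floatGt (count : Int) (n m : Nat) : Bool := decide (count * 2 ^ 53 > (rnd53 (n * m) : Int))

def m07 : Nat := 6305039478318694
def m05 : Nat := 4503599627370496
def m06 : Nat := 5404319552844595

-- any(word in msg.lower() for word in ['hey', 'hi'])
def condCasual (msg : String) : Bool :=
  PySem.Str.isIn "hey" (PySem.Str.lower msg) || PySem.Str.isIn "hi" (PySem.Str.lower msg)
-- '?' in msg
def condQuestion (msg : String) : Bool := PySem.Str.isIn "?" msg
-- len(msg.split()) <= 5
def condBrief (msg : String) : Bool := (PySem.Str.split₀ msg).length ≤ 5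

-- ===== PORT A =====
-- three separate counting passes, appending to `patterns` after each
def extract_greeting_patterns_py (greeting_messages : List String) : List String :=
  if greeting_messages = [] then []
  else
    let n := greeting_messages.length
    let patterns : List String := []
    let casual_greetings :=
      greeting_messages.foldl (fun a msg => if condCasual msg then a + 1 else a) (0 : Int)
    let patterns :=
      if floatGt casual_greetings n m07 then patterns ++ ["Prefers casual greetings (Hey, Hi)"]
      else patterns
    let question_greetings :=
      greeting_messages.foldl (fun a msg => if condQuestion msg then a + 1 else a) (0 : Int)
    let patterns :=
      if floatGt question_greetings n m05 then patterns ++ ["Often includes questions in greetings"]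
      else patterns
    let brief_greetings :=
      greeting_messages.foldl (fun a msg => if condBrief msg then a + 1 else a) (0 : Int)
    let patterns :=
      if floatGt brief_greetings n m06 then patterns ++ ["Keeps greetings brief and direct"]
      else patterns
    patterns

-- ===== PORT B =====
-- sig = (('hey' in low or 'hi' in low), '?' in msg, len(msg.split()) <= 5)
def sigOf (msg : String) : Bool × Bool × Bool :=
  (condCasual msg, condQuestion msg, condBrief msg)

-- one classification pass building hist[sig] = hist.get(sig, 0) + 1, then three marginal sums
def extract_greeting_patterns_py_alt (greeting_messages : List String) : List String :=
  if greeting_messages = [] then []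
  else
    let hist := greeting_messages.foldl
      (fun (d : PySem.Dict (Bool × Bool × Bool) Int) msg =>
        d.insert (sigOf msg) (d.getD (sigOf msg) 0 + 1))
      PySem.Dict.empty
    let n := greeting_messages.length
    let casual := hist.items.foldl (fun a p => if p.1.1 then a + p.2 else a) (0 : Int)
    let question := hist.items.foldl (fun a p => if p.1.2.1 then a + p.2 else a) (0 : Int)
    let brief := hist.items.foldl (fun a p => if p.1.2.2 then a + p.2 else a) (0 : Int)
    (if floatGt casual n m07 then ["Prefers casual greetings (Hey, Hi)"] else []) ++
    (if floatGt question n m05 then ["Often includes questions in greetings"] else []) ++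
    (if floatGt brief n m06 then ["Keeps greetings brief and direct"] else [])

-- ===== PRECONDITION & SPEC =====
def Spec_extract_greeting_patterns_py (greeting_messages : List String) (out : List String) : Prop := out = extract_greeting_patterns_py_alt greeting_messages
instance (greeting_messages : List String) (out : List String) : Decidable (Spec_extract_greeting_patterns_py greeting_messages out) := by unfold Spec_extract_greeting_patterns_py; infer_instance

-- ===== CLAIM (what is proved, stated in full; the proofs are below) =====
def Claim_equal_extract_greeting_patterns_py : Prop := ∀ (greeting_messages : List String), Dom_extract_greeting_patterns_py greeting_messages → Spec_extract_greeting_patterns_py greeting_messages (extract_greeting_patterns_py greeting_messages)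

-- ===== LEMMAS AND PROOFS =====

-- A's conditional-increment fold counts the elements satisfying the condition
theorem foldl_count {α : Type} (l : List α) (c : α → Bool) (s : Int) :
    l.foldl (fun a x => if c x then a + 1 else a) s = s + (l.countP c : Int) := by
  induction l generalizing s with
  | nil => simp
  | cons x t ih =>
      simp only [List.foldl_cons, ih, List.countP_cons]
      cases h : c x <;> simp <;> ring

-- B's guarded accumulation over a pair list is the sum of the guarded values
theorem foldl_if_add {α : Type} (l : List (α × Int)) (c : α → Bool) (s : Int) :
    l.foldl (fun a p => if c p.1 then a + p.2 else a) s
      = s + (l.map (fun p => if c p.1 then p.2 else 0)).sum := by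
  induction l generalizing s with
  | nil => simp
  | cons x t ih =>
      simp only [List.foldl_cons, List.map_cons, List.sum_cons, ih]
      cases h : c x.1 <;> simp <;> ring

-- summing the indicator of one key over a nodup list containing it gives 1
theorem sum_indicator_notmem {α : Type} [BEq α] [LawfulBEq α]
    (l : List α) (y : α) (hy : y ∉ l) :
    (l.map (fun k => if k == y then (1 : Int) else 0)).sum = 0 := by
  induction l with
  | nil => simp
  | cons a t ih =>
      simp only [List.mem_cons, not_or] at hy
      have : (a == y) = false := by
        rcases hy with ⟨h1, _⟩
        simp
        exact fun h => h1 h.symm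
      simp [this, ih hy.2]

theorem sum_indicator {α : Type} [BEq α] [LawfulBEq α]
    (l : List α) (y : α) (hn : l.Nodup) (hy : y ∈ l) :
    (l.map (fun k => if k == y then (1 : Int) else 0)).sum = 1 := by
  induction l with
  | nil => cases hy
  | cons a t ih =>
      rcases List.nodup_cons.mp hn with ⟨ha, ht⟩
      rcases List.mem_cons.mp hy with h | h
      · subst h
        simp [sum_indicator_notmem t y ha]
      · have : (a == y) = false := by
          simp
          intro hEq; exact ha (hEq ▸ h)
        simp [this, ih ht h]

-- pointwise sum split over a map
theorem sum_map_add {α : Type} (l : List α) (f g : α → Int) :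
    (l.map (fun k => f k + g k)).sum = (l.map f).sum + (l.map g).sum := by
  induction l with
  | nil => simp
  | cons a t ih => simp [ih]; ring

-- summing every multiplicity of ys over a nodup superset of ys's elements gives ys's length
theorem sum_count_nodup {α : Type} [BEq α] [LawfulBEq α]
    (l : List α) (ys : List α) (hn : l.Nodup) (hsub : ∀ y ∈ ys, y ∈ l) :
    (l.map (fun k => (ys.count k : Int))).sum = (ys.length : Int) := by
  induction ys with
  | nil => simp [List.count_nil]
  | cons y t ih =>
      have h1 : ∀ x ∈ t, x ∈ l := fun x hx => hsub x (List.mem_cons_of_mem _ hx)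
      have hy : y ∈ l := hsub y List.mem_cons_self
      have step : (l.map (fun k => ((y :: t).count k : Int))).sum
          = (l.map (fun k => (t.count k : Int))).sum
            + (l.map (fun k => if k == y then (1 : Int) else 0)).sum := by
        rw [← sum_map_add]
        apply congrArg
        apply List.map_congr_left
        intro k _
        rw [List.count_cons]
        by_cases h : k = y
        · subst h; simp
        · have hb : (k == y) = false := by simp [h]
          simp [hb]
          exact fun he => h he.symm
      rw [step, ih h1, sum_indicator l y hn hy]
      simp [List.length_cons]

-- the marginal sum of B's histogram over a signature predicate is A's count of the
-- corresponding message condition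
theorem marginal_eq (gm : List String) (pred : Bool × Bool × Bool → Bool) :
    (gm.foldl
      (fun (d : PySem.Dict (Bool × Bool × Bool) Int) msg =>
        d.insert (sigOf msg) (d.getD (sigOf msg) 0 + 1))
      PySem.Dict.empty).items.foldl (fun a p => if pred p.1 then a + p.2 else a) (0 : Int)
      = (gm.countP (fun msg => pred (sigOf msg)) : Int) := by
  have hfold : gm.foldl
      (fun (d : PySem.Dict (Bool × Bool × Bool) Int) msg =>
        d.insert (sigOf msg) (d.getD (sigOf msg) 0 + 1))
      PySem.Dict.empty
      = PySem.Dict.counter (gm.map sigOf) := by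
    rw [← PySem.Dict.foldl_insert_getD_add_one_eq_counter, List.foldl_map]
  rw [hfold, PySem.Dict.items_counter, foldl_if_add]
  set sigs := gm.map sigOf with hsigs
  have hmm : (((PySem.Set.ofList sigs : List _).map
        (fun k => (k, (sigs.count k : Int)))).map
        (fun p => if pred p.1 then p.2 else 0))
      = (PySem.Set.ofList sigs : List _).map
        (fun k => ((sigs.filter pred).count k : Int)) := by
    rw [List.map_map]
    apply List.map_congr_left
    intro k _
    simp only [Function.comp]
    by_cases h : pred k = true
    · rw [List.count_filter h, h]
      simp
    · have hnot : k ∉ sigs.filter pred := fun hk => h (List.of_mem_filter hk)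
      rw [List.count_eq_zero.mpr hnot]
      simp [h]
  rw [hmm, sum_count_nodup _ _ (PySem.Set.nodup_ofList sigs)
        (fun y hy => (PySem.Set.mem_ofList _ _).mpr (List.mem_of_mem_filter hy))]
  rw [hsigs, zero_add, ← List.countP_eq_length_filter, List.countP_map]
  rfl

-- marginal_eq specialised to the three signature components (beta-reduced forms the
-- final rewrite needs)
theorem marginal_casual (gm : List String) :
    (gm.foldl
      (fun (d : PySem.Dict (Bool × Bool × Bool) Int) msg =>
        d.insert (sigOf msg) (d.getD (sigOf msg) 0 + 1))
      PySem.Dict.empty).items.foldl (fun a p => if p.1.1 then a + p.2 else a) (0 : Int)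
      = (gm.countP condCasual : Int) := by
  have := marginal_eq gm (fun k => k.1)
  simpa [sigOf] using this

theorem marginal_question (gm : List String) :
    (gm.foldl
      (fun (d : PySem.Dict (Bool × Bool × Bool) Int) msg =>
        d.insert (sigOf msg) (d.getD (sigOf msg) 0 + 1))
      PySem.Dict.empty).items.foldl (fun a p => if p.1.2.1 then a + p.2 else a) (0 : Int)
      = (gm.countP condQuestion : Int) := by
  have := marginal_eq gm (fun k => k.2.1)
  simpa [sigOf] using this

theorem marginal_brief (gm : List String) :
    (gm.foldl
      (fun (d : PySem.Dict (Bool × Bool × Bool) Int) msg =>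
        d.insert (sigOf msg) (d.getD (sigOf msg) 0 + 1))
      PySem.Dict.empty).items.foldl (fun a p => if p.1.2.2 then a + p.2 else a) (0 : Int)
      = (gm.countP condBrief : Int) := by
  have := marginal_eq gm (fun k => k.2.2)
  simpa [sigOf] using this

-- the three guarded appends of A equal B's concatenation of three guarded singletons
theorem chain (t1 t2 t3 : Bool) (s1 s2 s3 : String) :
    (if t3 then (if t2 then (if t1 then ([] : List String) ++ [s1] else []) ++ [s2]
                 else (if t1 then ([] : List String) ++ [s1] else [])) ++ [s3]
     else (if t2 then (if t1 then ([] : List String) ++ [s1] else []) ++ [s2]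
           else (if t1 then ([] : List String) ++ [s1] else [])))
    = (if t1 then [s1] else []) ++ (if t2 then [s2] else []) ++ (if t3 then [s3] else []) := by
  cases t1 <;> cases t2 <;> cases t3 <;> rfl

-- ===== VERDICT (by name: the statement is the Claim_ definition above) =====
theorem extract_greeting_patterns_py_spec : Claim_equal_extract_greeting_patterns_py := by
  intro gm _
  show extract_greeting_patterns_py gm = extract_greeting_patterns_py_alt gm
  unfold extract_greeting_patterns_py extract_greeting_patterns_py_alt
  by_cases h : gm = []
  · simp [h]
  · simp only [if_neg h, marginal_casual, marginal_question, marginal_brief,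
      foldl_count, zero_add]
    exact chain _ _ _ _ _ _
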